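-- pv_equiv track=rewrite | github.com/informalsystems/modelator | python/modelator/utils.py | extract_parse_error
-- ===== SOURCE A (Python) =====
-- def extract_parse_error(parser_output: str):
--     report = []
--     reportActive = False
--     for line in parser_output.splitlines():
--
--         if line == "Residual stack trace follows:":
--             break
--
--         if reportActive is True:
--             report.append(line)
--
--         if line == "***Parse Error***":
--             reportActive = True
--
--     if len(report) == 0:
--         return None
--     else:
--         return "\n".join(report)
-- ===== SOURCE B (Python) =====
-- def extract_parse_error(parser_output: str):
--     lines = parser_output.splitlines()
--     try:
--         end = lines.index("Residual stack trace follows:")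
--     except ValueError:
--         end = len(lines)
--     lines = lines[:end]
--     try:
--         start = lines.index("***Parse Error***")
--     except ValueError:
--         return None
--     report = lines[start + 1:]
--     if not report:
--         return None
--     return "\n".join(report)
-- ===== Notes on version B (the rewrite author's own statement) =====
-- stated objective: simpler
-- what changed: Replaces the flag-driven accumulator loop with a boundary-find-then-slice decomposition: locate the end marker with list.index (default len), truncate, locate the start marker with list.index, and take the slice after it.
import Mathlib
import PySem

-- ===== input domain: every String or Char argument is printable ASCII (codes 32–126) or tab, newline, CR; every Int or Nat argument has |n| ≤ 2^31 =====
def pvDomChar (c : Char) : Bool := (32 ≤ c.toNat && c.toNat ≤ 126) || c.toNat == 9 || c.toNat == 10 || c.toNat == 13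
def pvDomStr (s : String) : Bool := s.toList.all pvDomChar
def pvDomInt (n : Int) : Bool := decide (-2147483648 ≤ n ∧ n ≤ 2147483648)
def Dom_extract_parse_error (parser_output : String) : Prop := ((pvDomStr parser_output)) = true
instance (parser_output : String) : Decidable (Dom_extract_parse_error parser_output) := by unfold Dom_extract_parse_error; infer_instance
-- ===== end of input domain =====

-- B replaces A's flag-driven accumulator loop with a boundary-find-then-slice decomposition (same cost, simpler).


-- ===== PORT A =====
-- flag-driven accumulator loop; break at the end marker, activate after the start marker
def pvLoopA : List String → List String → Bool → List String
  | [], report, _ => report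
  | line :: rest, report, reportActive =>
    if line = "Residual stack trace follows:" then report
    else
      let report := if reportActive = true then report ++ [line] else report
      let reportActive := if line = "***Parse Error***" then true else reportActive
      pvLoopA rest report reportActive

def extract_parse_error (parser_output : String) : Option String :=
  let report := pvLoopA (PySem.Str.splitlines parser_output) [] false
  if report.length = 0 then none else some (PySem.Str.join "\n" report)

-- ===== PORT B =====
-- B: find the end-marker boundary (index, default len), truncate, find the start marker, slice after it
def pvReportB (lines : List String) : Option (List String) :=
  let cut := lines.take ((PySem.List.index? lines "Residual stack trace follows:").getD lines.length)
  match PySem.List.index? cut "***Parse Error***" with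
  | none => none
  | some start => some (cut.drop (start + 1))

def extract_parse_error_alt (parser_output : String) : Option String :=
  match pvReportB (PySem.Str.splitlines parser_output) with
  | none => none
  | some report => if report = [] then none else some (PySem.Str.join "\n" report)

-- ===== PRECONDITION & SPEC =====
def Spec_extract_parse_error (parser_output : String) (out : Option String) : Prop := out = extract_parse_error_alt parser_output
instance (parser_output : String) (out : Option String) : Decidable (Spec_extract_parse_error parser_output out) := by unfold Spec_extract_parse_error; infer_instance

-- ===== CLAIM (what is proved, stated in full; the proofs are below) =====
def Claim_equal_extract_parse_error : Prop := ∀ (parser_output : String), Dom_extract_parse_error parser_output → Spec_extract_parse_error parser_output (extract_parse_error parser_output)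

-- ===== LEMMAS AND PROOFS =====

-- the accumulator of A's loop factors out
theorem pvLoopA_acc (lines : List String) (report : List String) (b : Bool) :
    pvLoopA lines report b = report ++ pvLoopA lines [] b := by
  induction lines generalizing report b with
  | nil => simp [pvLoopA]
  | cons line rest ih =>
    simp only [pvLoopA]
    split_ifs
    · simp
    · rw [ih (report ++ [line]), ih ([] ++ [line])]; simp
    · rw [ih (report ++ [line]), ih ([] ++ [line])]; simp
    · exact ih report _
    · exact ih report _

-- index?-with-default characterises takeWhile on the not-equal predicate
theorem pvTake_idx (xs : List String) (v : String) :
    xs.takeWhile (· ≠ v) = xs.take ((PySem.List.index? xs v).getD xs.length) := by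
  induction xs with
  | nil => simp
  | cons x rest ih =>
    by_cases h : x = v
    · subst h
      rw [PySem.List.index?_cons_self]
      simp
    · rw [PySem.List.index?_cons_of_ne _ h]
      cases hidx : PySem.List.index? rest v with
      | none =>
        have hv : v ∉ rest := by rw [← PySem.List.index?_eq_none_iff]; exact hidx
        simp only [Option.map_none, Option.getD_none, List.length_cons, List.take_succ_cons,
          List.takeWhile_cons]
        simp [h, List.takeWhile_eq_self_iff]
        exact fun x hx hxv => hv (hxv ▸ hx)
      | some k =>
        have hres : List.takeWhile (fun x => decide (x ≠ v)) rest = List.take k rest := by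
          rw [ih, hidx]; rfl
        simp [h]
        simpa using hres

-- once the flag is set, A's loop collects everything up to the end marker
theorem pvLoopA_active (lines : List String) :
    pvLoopA lines [] true = lines.takeWhile (· ≠ "Residual stack trace follows:") := by
  induction lines with
  | nil => simp [pvLoopA]
  | cons line rest ih =>
    by_cases h1 : line = "Residual stack trace follows:"
    · simp [pvLoopA, h1]
    · simp only [pvLoopA, if_neg h1, if_true, ite_self, List.nil_append]
      rw [pvLoopA_acc, ih]
      simp [h1]

-- the flag-loop report equals B's boundary-find-then-slice report
theorem pvLoopA_eq_reportB (lines : List String) :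
    pvLoopA lines [] false = (pvReportB lines).getD [] := by
  induction lines with
  | nil => simp [pvLoopA, pvReportB, PySem.List.index?]
  | cons line rest ih =>
    by_cases h1 : line = "Residual stack trace follows:"
    · subst h1
      simp only [pvReportB, PySem.List.index?_cons_self, Option.getD_some, List.take_zero]
      simp [pvLoopA, PySem.List.index?]
    · have hk : ((PySem.List.index? (line :: rest) "Residual stack trace follows:").getD
          (line :: rest).length)
          = ((PySem.List.index? rest "Residual stack trace follows:").getD rest.length) + 1 := by
        rw [PySem.List.index?_cons_of_ne _ h1]
        cases hidx : PySem.List.index? rest "Residual stack trace follows:" <;> simp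
      by_cases h2 : line = "***Parse Error***"
      · subst h2
        simp only [pvLoopA, if_neg h1, Bool.false_eq_true, if_false, if_true,
          List.nil_append]
        rw [pvLoopA_active, pvTake_idx]
        simp only [pvReportB, hk, List.take_succ_cons]
        rw [PySem.List.index?_cons_self]
        simp
      · simp only [pvLoopA, if_neg h1, Bool.false_eq_true, if_false, if_neg h2, List.nil_append]
        rw [ih]
        simp only [pvReportB, hk, List.take_succ_cons]
        rw [PySem.List.index?_cons_of_ne _ h2]
        cases hidx : PySem.List.index?
            (rest.take ((PySem.List.index? rest "Residual stack trace follows:").getD rest.length))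
            "***Parse Error***" <;> simp

-- ===== VERDICT (by name: the statement is the Claim_ definition above) =====
theorem extract_parse_error_spec : Claim_equal_extract_parse_error := by
  intro s _
  unfold Spec_extract_parse_error extract_parse_error extract_parse_error_alt
  rw [pvLoopA_eq_reportB]
  cases h : pvReportB (PySem.Str.splitlines s) with
  | none => simp
  | some r => cases r <;> simp
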